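-- pv_equiv track=rewrite | github.com/Coaxecva/COMP4030-Design-and-Analysis-of-Algorithms | Fall2017/hw-sol/hw8/dmcoomes.py | it_is_restorable
-- ===== SOURCE A (Python) =====
-- def it_is_restorable(text, D):
-- 	R = [False] * len(text)
-- 	for i in range(0, len(text)):
-- 		isV, isU = False, False
-- 		for j in range(0, i):
-- 			u = text[0:j]
-- 			v = text[j:i+1]
-- 			for x in D:
-- 				if v == x:
-- 					isV = True
-- 				if u == x:
-- 					isU = True
-- 			if isV and isU:
-- 				R[i] = True
-- 	return R[len(text)-1]
-- ===== SOURCE B (Python) =====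
-- def it_is_restorable(text, D):
--     n = len(text)
--     words = set(D)
--     has_prefix = any(text[:j] in words for j in range(n - 1))
--     has_suffix = any(text[j:] in words for j in range(n - 1))
--     return has_prefix and has_suffix
-- ===== Notes on version B (the rewrite author's own statement) =====
-- stated objective: faster
-- what changed: A's triple loop accumulates isV/isU monotonically, so its result is just 'some proper prefix of length <= n-2 is in D' AND 'some suffix of length >= 2 is in D' checked independently; B computes exactly these two existence checks in one pass each over split points with a set for D, dropping the outer i-loop and the inner D-scan.
import Mathlib
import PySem

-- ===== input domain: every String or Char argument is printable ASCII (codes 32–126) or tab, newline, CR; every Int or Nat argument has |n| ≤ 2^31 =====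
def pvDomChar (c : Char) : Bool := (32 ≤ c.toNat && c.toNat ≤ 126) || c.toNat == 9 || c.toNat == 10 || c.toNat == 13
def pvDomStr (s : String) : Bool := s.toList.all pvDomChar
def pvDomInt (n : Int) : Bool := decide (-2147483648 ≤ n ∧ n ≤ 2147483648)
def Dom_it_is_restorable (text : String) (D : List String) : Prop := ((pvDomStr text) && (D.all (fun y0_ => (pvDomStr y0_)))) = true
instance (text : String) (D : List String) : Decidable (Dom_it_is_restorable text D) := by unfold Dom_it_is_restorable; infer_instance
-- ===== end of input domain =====

-- B replaces A's triple nested loop by two independent one-pass existence checks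
-- (prefix in D, suffix in D) over a set built from D: asymptotically faster.

-- ===== PORT A =====
-- state of the inner j-loop: (isV, isU, R)
def pvAStep (cs : List Char) (D : List String) (i : Int)
    (st : Bool × Bool × List Bool) (j : Int) : Bool × Bool × List Bool :=
  let u := PySem.List.slice cs (some 0) (some j)
  let v := PySem.List.slice cs (some j) (some (i + 1))
  let p := D.foldl (fun (p : Bool × Bool) x =>
      ((if v = x.toList then true else p.1), (if u = x.toList then true else p.2)))
    (st.1, st.2.1)
  let R' := if p.1 && p.2 then st.2.2.set i.toNat true else st.2.2
  (p.1, p.2, R')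

def it_is_restorable (text : String) (D : List String) : Bool :=
  let cs := text.toList
  let n : Int := cs.length
  let R0 : List Bool := List.replicate cs.length false
  let R := (PySem.List.pyRange 0 n 1).foldl (fun R i =>
      ((PySem.List.pyRange 0 i 1).foldl (pvAStep cs D i) (false, false, R)).2.2) R0
  -- Python returns R[len(text)-1]; on empty text this raises IndexError (excluded by Pre_)
  PySem.List.pyGetD R (n - 1) false

-- ===== PORT B =====
def it_is_restorable_alt (text : String) (D : List String) : Bool :=
  let cs := text.toList
  let n := cs.length
  let words : PySem.Set (List Char) := PySem.Set.ofList (D.map (fun x => x.toList))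
  let hasPrefix := (List.range (n - 1)).any (fun j => PySem.Set.contains words (cs.take j))
  let hasSuffix := (List.range (n - 1)).any (fun j => PySem.Set.contains words (cs.drop j))
  hasPrefix && hasSuffix

-- ===== PRECONDITION & SPEC =====
-- Pre_ excludes only the empty text, on which A raises IndexError (R[-1] of an empty list).
def Pre_it_is_restorable (text : String) (D : List String) : Prop := text.toList ≠ []
instance (text : String) (D : List String) : Decidable (Pre_it_is_restorable text D) := by
  unfold Pre_it_is_restorable; infer_instance

def pvWitness_it_is_restorable : String × List String := ("ab", ["a", "b"])

def Spec_it_is_restorable (text : String) (D : List String) (out : Bool) : Prop :=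
  out = it_is_restorable_alt text D
instance (text : String) (D : List String) (out : Bool) : Decidable (Spec_it_is_restorable text D out) := by
  unfold Spec_it_is_restorable; infer_instance

-- ===== CLAIM (what is proved, stated in full; the proofs are below) =====
def Claim_equal_it_is_restorable : Prop := ∀ (text : String) (D : List String),
  Dom_it_is_restorable text D → Pre_it_is_restorable text D →
  Spec_it_is_restorable text D (it_is_restorable text D)

-- ===== LEMMAS AND PROOFS =====

-- the D-scan of A just ORs in "v matches some word" / "u matches some word"
theorem pvDfold (D : List String) (v u : List Char) (p : Bool × Bool) :
    D.foldl (fun (p : Bool × Bool) x =>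
      ((if v = x.toList then true else p.1), (if u = x.toList then true else p.2))) p
    = (p.1 || D.any (fun x => v = x.toList), p.2 || D.any (fun x => u = x.toList)) := by
  induction D generalizing p with
  | nil => simp
  | cons x xs ih =>
    simp only [List.foldl_cons, List.any_cons, ih]
    by_cases h1 : v = x.toList <;> by_cases h2 : u = x.toList <;> simp [h1, h2]

-- the j-loop invariant: isV/isU accumulate existence, and R[i] is set iff both end up true
theorem pvAStep_eq (cs : List Char) (D : List String) (i : Int) (bV bU : Bool)
    (R : List Bool) (j : Int) :
    pvAStep cs D i (bV, bU, R) j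
    = ((bV || D.any (fun x => PySem.List.slice cs (some j) (some (i+1)) = x.toList)),
       (bU || D.any (fun x => PySem.List.slice cs (some 0) (some j) = x.toList)),
       (if (bV || D.any (fun x => PySem.List.slice cs (some j) (some (i+1)) = x.toList))
           && (bU || D.any (fun x => PySem.List.slice cs (some 0) (some j) = x.toList))
        then R.set i.toNat true else R)) := by
  simp only [pvAStep, pvDfold]

theorem pvJfold (cs : List Char) (D : List String) (i : Int) (js : List Int)
    (bV bU : Bool) (R : List Bool) :
    js.foldl (pvAStep cs D i) (bV, bU, R)
    = ((bV || js.any (fun j => D.any (fun x => PySem.List.slice cs (some j) (some (i+1)) = x.toList))),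
       (bU || js.any (fun j => D.any (fun x => PySem.List.slice cs (some 0) (some j) = x.toList))),
       (if ((bV || js.any (fun j => D.any (fun x => PySem.List.slice cs (some j) (some (i+1)) = x.toList)))
           && (bU || js.any (fun j => D.any (fun x => PySem.List.slice cs (some 0) (some j) = x.toList))))
           && !js.isEmpty
        then R.set i.toNat true else R)) := by
  induction js generalizing bV bU R with
  | nil => simp
  | cons j js ih =>
    rw [List.foldl_cons, pvAStep_eq, ih]
    simp only [List.any_cons, List.isEmpty_cons, Bool.not_false, Bool.and_true]
    rcases js with _ | ⟨k, ks⟩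
    · set a := D.any (fun x => PySem.List.slice cs (some j) (some (i+1)) = x.toList)
      set b := D.any (fun x => PySem.List.slice cs (some 0) (some j) = x.toList)
      cases a <;> cases b <;> cases bV <;> cases bU <;> simp
    · simp only [List.isEmpty_cons, Bool.not_false, Bool.and_true]
      set a := D.any (fun x => PySem.List.slice cs (some j) (some (i+1)) = x.toList)
      set b := D.any (fun x => PySem.List.slice cs (some 0) (some j) = x.toList)
      set A' := (k :: ks).any (fun j => D.any (fun x => PySem.List.slice cs (some j) (some (i+1)) = x.toList))
      set B' := (k :: ks).any (fun j => D.any (fun x => PySem.List.slice cs (some 0) (some j) = x.toList))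
      cases a <;> cases b <;> cases bV <;> cases bU <;> cases A' <;> cases B' <;>
        simp [List.set_set]

-- the full i-loop keeps length and, below the last index, never touches entry n-1
theorem pvOuterLen (cs : List Char) (D : List String) (is : List Int) (R : List Bool) :
    (is.foldl (fun R i =>
      ((PySem.List.pyRange 0 i 1).foldl (pvAStep cs D i) (false, false, R)).2.2) R).length
    = R.length := by
  induction is generalizing R with
  | nil => rfl
  | cons i is ih =>
    rw [List.foldl_cons, ih, pvJfold]
    split <;> simp

theorem pvOuterGet (cs : List Char) (D : List String) (is : List Int) (R : List Bool)
    (k : Nat) (hk : ∀ i ∈ is, i.toNat ≠ k) :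
    (is.foldl (fun R i =>
      ((PySem.List.pyRange 0 i 1).foldl (pvAStep cs D i) (false, false, R)).2.2) R)[k]?
    = R[k]? := by
  induction is generalizing R with
  | nil => rfl
  | cons i is ih =>
    rw [List.foldl_cons, ih _ (fun i hi => hk i (List.mem_cons_of_mem _ hi)), pvJfold]
    split
    · exact List.getElem?_set_ne (fun h => hk i (List.mem_cons_self ..) h)
    · rfl

-- set-membership in B's word set = A's linear scan over D
theorem pvContains (D : List String) (l : List Char) :
    PySem.Set.contains (PySem.Set.ofList (D.map (fun x => x.toList))) l
    = D.any (fun x => l = x.toList) := by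
  rcases h : D.any (fun x => l = x.toList) with _ | _
  · simp only [Bool.eq_false_iff, ne_eq]
    intro hc
    have := (PySem.Set.contains_iff _ _).1 hc
    rw [PySem.Set.mem_ofList, List.mem_map] at this
    obtain ⟨x, hx, hxl⟩ := this
    simp only [List.any_eq_false] at h
    exact h x hx (by simp [hxl])
  · simp only [List.any_eq_true] at h
    obtain ⟨x, hx, hxl⟩ := h
    apply (PySem.Set.contains_iff _ _).2
    rw [PySem.Set.mem_ofList, List.mem_map]
    exact ⟨x, hx, (of_decide_eq_true hxl).symm⟩

-- slices at the final row i = n-1 are plain take/drop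
theorem pvSliceU (cs : List Char) (j : Nat) :
    PySem.List.slice cs (some 0) (some (j : Int)) = cs.take j := by
  rw [PySem.List.slice_zero_start, PySem.List.slice_to_natCast]

theorem pvSliceV (cs : List Char) (j : Nat) :
    PySem.List.slice cs (some (j : Int)) (some (cs.length : Int)) = cs.drop j := by
  rw [PySem.List.slice_natCast]
  exact List.take_of_length_le (by simp)

-- ===== VERDICT (by name: the statement is the Claim_ definition above) =====
theorem it_is_restorable_spec : Claim_equal_it_is_restorable := by
  intro text D _ hpre
  unfold Spec_it_is_restorable it_is_restorable it_is_restorable_alt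
  set cs := text.toList with hcs
  have hne : cs ≠ [] := hpre
  obtain ⟨m, hm⟩ : ∃ m, cs.length = m + 1 :=
    ⟨cs.length - 1, by
      have h0 : cs.length ≠ 0 := fun h => hne (List.length_eq_zero_iff.mp h)
      omega⟩
  simp only
  -- split the i-range at its last element
  have hsplit : PySem.List.pyRange 0 (cs.length : Int) 1
      = PySem.List.pyRange 0 (m : Int) 1 ++ [(m : Int)] := by
    rw [hm]; push_cast
    rw [PySem.List.pyRange_one_append 0 (m : Int) ((m : Int) + 1) (by positivity) (by omega),
        PySem.List.pyRange_one_singleton]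
  rw [hsplit, List.foldl_append, List.foldl_cons, List.foldl_nil, pvJfold]
  set Rp := (PySem.List.pyRange 0 (m : Int) 1).foldl (fun R i =>
      ((PySem.List.pyRange 0 i 1).foldl (pvAStep cs D i) (false, false, R)).2.2)
      (List.replicate cs.length false) with hRp
  have hRplen : Rp.length = cs.length := by
    rw [hRp, pvOuterLen]; simp
  have hRpm : Rp[m]? = some false := by
    rw [hRp, pvOuterGet]
    · rw [List.getElem?_replicate]; simp [hm]
    · intro i hi
      rw [PySem.List.mem_pyRange_one] at hi
      omega
  have hmn : ((m : Int)).toNat = m := by simp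
  set P := ((PySem.List.pyRange 0 (m : Int) 1).any
      (fun j => D.any (fun x => PySem.List.slice cs (some j) (some ((m : Int) + 1)) = x.toList)))
    && ((PySem.List.pyRange 0 (m : Int) 1).any
      (fun j => D.any (fun x => PySem.List.slice cs (some 0) (some j) = x.toList))) with hP
  simp only [Bool.false_or]
  rw [← hP]
  -- read off entry n-1 of the final R
  have hget : ∀ b : Bool, PySem.List.pyGetD (if b = true then Rp.set ((m : Int)).toNat true else Rp)
      ((cs.length : Int) - 1) false = b := by
    intro b
    have hidx : ((cs.length : Int) - 1) = ((m : Nat) : Int) := by rw [hm]; push_cast; ring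
    rw [hidx, PySem.List.pyGetD_natCast, List.getD_eq_getElem?_getD, hmn]
    cases b with
    | true =>
      have h1 : (Rp.set m true)[m]? = some true := List.getElem?_set_self (by omega)
      simp [h1]
    | false => simp [hRpm]
  rw [hget]
  -- the isEmpty guard is vacuous: if the j-range is empty, P is false anyway
  have hPe : (P && !(PySem.List.pyRange 0 (m : Int) 1).isEmpty) = P := by
    by_cases hm0 : m = 0
    · subst hm0
      have h0 : PySem.List.pyRange 0 ((0 : Nat) : Int) 1 = [] :=
        PySem.List.pyRange_one_eq_nil (by norm_num)
      rw [hP, h0]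
      simp
    · have hne' : PySem.List.pyRange 0 (m : Int) 1 ≠ [] := by
        intro h
        have h0 : (0 : Int) ∈ PySem.List.pyRange 0 (m : Int) 1 :=
          PySem.List.mem_pyRange_one.mpr ⟨le_refl 0, by exact_mod_cast Nat.pos_of_ne_zero hm0⟩
        rw [h] at h0
        exact absurd h0 (List.not_mem_nil)
      simp [hne']
  rw [hPe, hP]
  -- identify the two existence checks with B's passes
  have hrange : PySem.List.pyRange 0 (m : Int) 1 = (List.range m).map Int.ofNat := by
    have ht : ((m : Int) - 0).toNat = m := by omega
    rw [PySem.List.pyRange_one, ht]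
    simp only [zero_add]
    rfl
  have hV : ((PySem.List.pyRange 0 (m : Int) 1).any
      (fun j => D.any (fun x => PySem.List.slice cs (some j) (some ((m : Int) + 1)) = x.toList)))
      = (List.range (cs.length - 1)).any (fun j => PySem.Set.contains
          (PySem.Set.ofList (D.map (fun x => x.toList))) (cs.drop j)) := by
    rw [hrange, List.any_map, hm]
    simp only [Nat.add_sub_cancel]
    apply List.any_congr rfl
    intro j
    have hc : ((m : Int) + 1) = ((cs.length : Nat) : Int) := by rw [hm]; push_cast; ring
    simp only [Function.comp, Int.ofNat_eq_natCast, hc, pvSliceV, pvContains]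
  have hU : ((PySem.List.pyRange 0 (m : Int) 1).any
      (fun j => D.any (fun x => PySem.List.slice cs (some 0) (some j) = x.toList)))
      = (List.range (cs.length - 1)).any (fun j => PySem.Set.contains
          (PySem.Set.ofList (D.map (fun x => x.toList))) (cs.take j)) := by
    rw [hrange, List.any_map, hm]
    simp only [Nat.add_sub_cancel]
    apply List.any_congr rfl
    intro j
    simp only [Function.comp, Int.ofNat_eq_natCast, pvSliceU, pvContains]
  rw [hV, hU, Bool.and_comm]
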